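-- pv_equiv track=rewrite | github.com/Zeng-WH/step-by-step-ppo | ppo_train_prm_full_wandb.py | compute_index
-- ===== SOURCE A (Python) =====
-- def find_double_13(lst, line_id):
--     result = []
--     for i in range(len(lst)-1):
--         if lst[i] == line_id and lst[i+1] == line_id:
--             result.append(i)
--     return result
--
-- def find_13_indices(lst, line_id):
--     indices = []
--     for i, value in enumerate(lst):
--         if value == line_id:
--             indices.append(i)
--     return indices
--
-- def is_sublist(sub_list, my_list):
--     sub_len = len(sub_list)
--     for i in range(len(my_list) - sub_len + 1):
--         if my_list[i:i+sub_len] == sub_list: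
--             return True
--     return False
--
-- def compute_index(value_list, line_id):
--     index_list = []
--     if value_list[0] == line_id and value_list[1] == line_id:
--         #if [13, 13] in value_list[2:]:
--         if is_sublist([line_id, line_id], value_list[2:]):
--             index_list =  find_double_13(value_list[2:], line_id)
--         else:
--             index_list = find_13_indices(value_list[2:], line_id)
--         index_list = [i + 2 for i in index_list]
--
--     else:
--         if is_sublist([line_id, line_id], value_list[1:]):
--             index_list = find_double_13(value_list[1:], line_id)
--
--         else:
--             index_list = find_13_indices(value_list[1:], line_id)
--
--         index_list = [i + 1 for i in index_list]
--     index_list.append(len(value_list)-1)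
--     return index_list
-- ===== SOURCE B (Python) =====
-- def compute_index(value_list, line_id):
--     offset = 2 if value_list[0] == line_id and value_list[1] == line_id else 1
--     rest = value_list[offset:]
--     occ = [i for i, v in enumerate(rest) if v == line_id]
--     doubles = [p for p, q in zip(occ, occ[1:]) if q == p + 1]
--     index_list = doubles if doubles else occ
--     return [i + offset for i in index_list] + [len(value_list) - 1]
-- ===== Notes on version B (the rewrite author's own statement) =====
-- stated objective: simpler
-- what changed: A decides between two fresh scans with a separate quadratic-ish is_sublist existence scan and then collects with one of two dedicated helper loops; B builds the occurrence-index table of the tail once, derives the adjacent-pair starts from that table by a zip pass, and picks doubles-if-nonempty, removing the existence scan and both helper loops.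
import Mathlib
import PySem

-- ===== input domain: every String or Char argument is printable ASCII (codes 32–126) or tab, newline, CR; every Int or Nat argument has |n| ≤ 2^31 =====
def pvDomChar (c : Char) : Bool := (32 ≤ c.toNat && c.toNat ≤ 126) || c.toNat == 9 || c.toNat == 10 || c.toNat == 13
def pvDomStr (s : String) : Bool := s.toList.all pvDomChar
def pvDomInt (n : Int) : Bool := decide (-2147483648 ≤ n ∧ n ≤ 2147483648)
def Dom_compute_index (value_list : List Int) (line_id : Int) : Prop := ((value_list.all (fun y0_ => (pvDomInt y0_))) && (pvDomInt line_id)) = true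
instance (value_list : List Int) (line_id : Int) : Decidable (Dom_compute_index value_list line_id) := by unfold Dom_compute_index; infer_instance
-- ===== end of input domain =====

-- B replaces A's three helper scans (a sublist-existence scan plus two separate collection scans)
-- by one occurrence-index build over the tail and a derived adjacency pass; objective: simpler.

-- ===== PORT A =====
def find_double_13 (lst : List Int) (line_id : Int) : List Int :=
  (PySem.List.pyRange 0 ((lst.length : Int) - 1) 1).foldl
    (fun result i =>
      if PySem.List.pyGetD lst i 0 == line_id && PySem.List.pyGetD lst (i + 1) 0 == line_id then
        result ++ [i]
      else result) []

def find_13_indices (lst : List Int) (line_id : Int) : List Int :=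
  (PySem.List.enumerate lst 0).foldl
    (fun indices iv => if iv.2 = line_id then indices ++ [iv.1] else indices) []

def is_sublist (sub_list : List Int) (my_list : List Int) : Bool :=
  (PySem.List.pyRange 0 ((my_list.length : Int) - (sub_list.length : Int) + 1) 1).any
    (fun i => PySem.List.slice my_list (some i) (some (i + (sub_list.length : Int))) == sub_list)

def compute_index (value_list : List Int) (line_id : Int) : List Int :=
  -- short-circuit 'value_list[0] == line_id and value_list[1] == line_id': pyGet? is none exactly
  -- where Python raises IndexError; those inputs are excluded by Pre_compute_index below
  if PySem.List.pyGet? value_list 0 = some line_id ∧ PySem.List.pyGet? value_list 1 = some line_id then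
    (if is_sublist [line_id, line_id] (PySem.List.slice value_list (some 2) none) then
        find_double_13 (PySem.List.slice value_list (some 2) none) line_id
      else
        find_13_indices (PySem.List.slice value_list (some 2) none) line_id).map (fun i => i + 2)
      ++ [(value_list.length : Int) - 1]
  else
    (if is_sublist [line_id, line_id] (PySem.List.slice value_list (some 1) none) then
        find_double_13 (PySem.List.slice value_list (some 1) none) line_id
      else
        find_13_indices (PySem.List.slice value_list (some 1) none) line_id).map (fun i => i + 1)
      ++ [(value_list.length : Int) - 1]

-- ===== PORT B =====
-- occurrences of line_id in rest ('occ' of Source B)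
def occB (rest : List Int) (line_id : Int) : List Int :=
  (PySem.List.enumerate rest 0).filterMap (fun iv => if iv.2 = line_id then some iv.1 else none)

-- adjacent-pair starts derived from occ ('doubles' of Source B)
def doublesB (occ : List Int) : List Int :=
  (occ.zip (occ.drop 1)).filterMap (fun pq => if pq.2 = pq.1 + 1 then some pq.1 else none)

def compute_index_alt (value_list : List Int) (line_id : Int) : List Int :=
  let offset : Int :=
    if PySem.List.pyGet? value_list 0 = some line_id ∧ PySem.List.pyGet? value_list 1 = some line_id
    then 2 else 1
  let occ := occB (PySem.List.slice value_list (some offset) none) line_id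
  let doubles := doublesB occ
  (if doubles = [] then occ else doubles).map (fun i => i + offset)
    ++ [(value_list.length : Int) - 1]

-- ===== PRECONDITION & SPEC =====
-- Pre_ excludes exactly the inputs on which Python A raises IndexError: the empty list
-- (value_list[0]) and a one-element list whose only element equals line_id (value_list[1]).
def Pre_compute_index (value_list : List Int) (line_id : Int) : Prop :=
  value_list ≠ [] ∧ (2 ≤ value_list.length ∨ value_list.headD 0 ≠ line_id)
instance (value_list : List Int) (line_id : Int) : Decidable (Pre_compute_index value_list line_id) := by
  unfold Pre_compute_index; infer_instance

def pvWitness_compute_index : List Int × Int := ([13, 13, 5, 13, 13, 7], 13)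

def Spec_compute_index (value_list : List Int) (line_id : Int) (out : List Int) : Prop := out = compute_index_alt value_list line_id
instance (value_list : List Int) (line_id : Int) (out : List Int) : Decidable (Spec_compute_index value_list line_id out) := by unfold Spec_compute_index; infer_instance

-- ===== CLAIM (what is proved, stated in full; the proofs are below) =====
def Claim_equal_compute_index : Prop := ∀ (value_list : List Int) (line_id : Int), Dom_compute_index value_list line_id → Pre_compute_index value_list line_id → Spec_compute_index value_list line_id (compute_index value_list line_id)

-- ===== LEMMAS AND PROOFS =====

def occF (id : Int) : List Int → Int → List Int
  | [], _ => []
  | x :: xs, k => (if x = id then [k] else []) ++ occF id xs (k + 1)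

def dblF (id : Int) : List Int → Int → List Int
  | [], _ => []
  | [_], _ => []
  | x :: y :: xs, k => (if x = id ∧ y = id then [k] else []) ++ dblF id (y :: xs) (k + 1)

def pairsAdj (l : List Int) : List Int :=
  (l.zip (l.drop 1)).filterMap (fun pq => if pq.2 = pq.1 + 1 then some pq.1 else none)

theorem occ_filterMap_eq_occF (lst : List Int) (id : Int) (s : Int) :
    (PySem.List.enumerate lst s).filterMap
      (fun iv => if iv.2 = id then some iv.1 else none) = occF id lst s := by
  induction lst generalizing s with
  | nil => simp [PySem.List.enumerate_nil, occF]
  | cons x xs ih =>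
    rw [PySem.List.enumerate_cons]
    by_cases h : x = id <;> simp [occF, h, ih]

theorem find_13_indices_eq_occF (lst : List Int) (id : Int) (s : Int) (acc : List Int) :
    (PySem.List.enumerate lst s).foldl
      (fun indices iv => if iv.2 = id then indices ++ [iv.1] else indices) acc
      = acc ++ occF id lst s := by
  induction lst generalizing s acc with
  | nil => simp [PySem.List.enumerate_nil, occF]
  | cons x xs ih =>
    rw [PySem.List.enumerate_cons]
    by_cases h : x = id <;> simp [occF, h, ih]

theorem occF_lb (id : Int) (lst : List Int) (k : Int) : ∀ m ∈ occF id lst k, k ≤ m := by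
  induction lst generalizing k with
  | nil => simp [occF]
  | cons x xs ih =>
    intro m hm
    simp only [occF, List.mem_append] at hm
    rcases hm with hm | hm
    · split at hm <;> simp_all
    · have := ih (k+1) m hm; omega

theorem pairsAdj_cons (a : Int) (l : List Int) :
    pairsAdj (a :: l) =
      (match l with | [] => [] | b :: _ => if b = a + 1 then [a] else []) ++ pairsAdj l := by
  cases l with
  | nil => simp [pairsAdj]
  | cons b t => by_cases h : b = a + 1 <;> simp [pairsAdj, h]

theorem pairsAdj_occF (id : Int) (lst : List Int) (k : Int) :
    pairsAdj (occF id lst k) = dblF id lst k := by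
  induction lst generalizing k with
  | nil => simp [occF, dblF, pairsAdj]
  | cons x xs ih =>
    cases xs with
    | nil => by_cases hx : x = id <;> simp [occF, dblF, pairsAdj, hx]
    | cons y ys =>
      by_cases hx : x = id
      · by_cases hy : y = id
        · have hih := ih (k + 1)
          rw [show occF id (y :: ys) (k + 1) = (k + 1) :: occF id ys (k + 1 + 1) from by
            simp [occF, hy]] at hih
          rw [show occF id (x :: y :: ys) k = k :: (k + 1) :: occF id ys (k + 1 + 1) from by
            simp [occF, hx, hy]]
          rw [pairsAdj_cons, hih]
          simp [dblF, hx, hy]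
        · have hih := ih (k + 1)
          have hocce : occF id (y :: ys) (k + 1) = occF id ys (k + 1 + 1) := by
            simp [occF, hy]
          rw [hocce] at hih
          have hlb := occF_lb id ys (k + 1 + 1)
          rw [show occF id (x :: y :: ys) k = k :: occF id ys (k + 1 + 1) from by
            simp [occF, hx, hy]]
          rw [pairsAdj_cons, hih]
          cases hocc : occF id ys (k + 1 + 1) with
          | nil => simp [dblF, hy]
          | cons a t =>
            have ha : k + 1 + 1 ≤ a := hlb a (by rw [hocc]; exact List.mem_cons_self)
            have hne : ¬(a = k + 1) := by omega
            simp [dblF, hy, hne]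
      · have hih := ih (k + 1)
        rw [show occF id (x :: y :: ys) k = occF id (y :: ys) (k + 1) from by
          simp [occF, hx]]
        rw [hih]
        simp [dblF, hx]

theorem filterMap_if_eq_map_filter {α β : Type} (p : α → Prop) [DecidablePred p] (f : α → β) (l : List α) :
    l.filterMap (fun x => if p x then some (f x) else none) = (l.filter (fun x => p x)).map f := by
  induction l with
  | nil => rfl
  | cons x xs ih => by_cases h : p x <;> simp [h, ih]

theorem dblF_eq_filterMap (id : Int) (lst : List Int) (k : Int) :
    dblF id lst k = (List.range (lst.length - 1)).filterMap
      (fun j => if lst.getD j 0 = id ∧ lst.getD (j + 1) 0 = id then some (k + (j : Int)) else none) := by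
  induction lst generalizing k with
  | nil => simp [dblF]
  | cons x xs ih =>
    cases xs with
    | nil => simp [dblF]
    | cons y ys =>
      rw [show (x :: y :: ys).length - 1 = ys.length + 1 from by simp]
      rw [List.range_succ_eq_map]
      simp only [List.filterMap_cons, List.filterMap_map]
      have htail : List.filterMap
            ((fun j : Nat => if (x :: y :: ys).getD j 0 = id ∧ (x :: y :: ys).getD (j + 1) 0 = id
              then some (k + (j : Int)) else none) ∘ Nat.succ) (List.range ys.length)
          = List.filterMap
            (fun j : Nat => if (y :: ys).getD j 0 = id ∧ (y :: ys).getD (j + 1) 0 = id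
              then some ((k + 1) + (j : Int)) else none) (List.range ys.length) := by
        apply List.filterMap_congr
        intro j _
        simp only [Function.comp_apply, Nat.succ_eq_add_one, List.getD_cons_succ]
        split_ifs with h
        · congr 1
          push_cast
          ring
        · rfl
      rw [htail]
      have hih := ih (k + 1)
      rw [show (y :: ys).length - 1 = ys.length from by simp] at hih
      rw [← hih]
      by_cases h0 : x = id ∧ y = id <;>
        simp [dblF, h0, List.getD_cons_zero, List.getD_cons_succ]

theorem find_double_13_eq_dblF (lst : List Int) (id : Int) :
    find_double_13 lst id = dblF id lst 0 := by
  unfold find_double_13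
  rw [PySem.List.foldl_append_if
    (p := fun i => PySem.List.pyGetD lst i 0 == id && PySem.List.pyGetD lst (i + 1) 0 == id)
    (f := fun i => i)]
  rw [PySem.List.pyRange_one, List.filter_map, List.map_map]
  rw [dblF_eq_filterMap, filterMap_if_eq_map_filter]
  rw [show ((lst.length : Int) - 1 - 0).toNat = lst.length - 1 from by omega]
  rw [List.nil_append]
  have hfc : List.filter
        ((fun i => PySem.List.pyGetD lst i 0 == id && PySem.List.pyGetD lst (i + 1) 0 == id)
          ∘ (fun k : Nat => (0 : Int) + k)) (List.range (lst.length - 1))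
      = List.filter (fun j : Nat => decide (lst.getD j 0 = id ∧ lst.getD (j + 1) 0 = id))
        (List.range (lst.length - 1)) := by
    apply List.filter_congr
    intro j _
    simp only [Function.comp_apply]
    rw [show ((0 : Int) + (j : Int)) = ((j : Nat) : Int) from by ring]
    rw [show (((j : Nat) : Int) + 1) = ((j + 1 : Nat) : Int) from by push_cast; ring]
    simp only [PySem.List.pyGetD_natCast]
    rw [Bool.eq_iff_iff]
    simp [List.getD]
  rw [hfc]
  apply List.map_congr_left
  intro j _
  simp

theorem take_two_drop (lst : List Int) (j : Nat) (a b : Int) (h : j + 1 < lst.length) :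
    ((lst.drop j).take 2 = [a, b]) ↔ (lst.getD j 0 = a ∧ lst.getD (j + 1) 0 = b) := by
  rw [List.drop_eq_getElem_cons (by omega : j < lst.length), List.drop_eq_getElem_cons h]
  rw [show (2 : Nat) = 1 + 1 from rfl, List.take_succ_cons, List.take_succ_cons, List.take_zero]
  rw [List.getD_eq_getElem lst 0 (by omega : j < lst.length), List.getD_eq_getElem lst 0 h]
  simp only [List.cons.injEq, and_true]

theorem is_sublist_iff_dblF (lst : List Int) (id : Int) :
    is_sublist [id, id] lst = true ↔ dblF id lst 0 ≠ [] := by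
  unfold is_sublist
  rw [List.any_eq_true, dblF_eq_filterMap]
  rw [show ((([id, id] : List Int).length : Int)) = 2 from by norm_num]
  constructor
  · rintro ⟨i, hi, hslice⟩
    rw [PySem.List.mem_pyRange_one] at hi
    rw [beq_iff_eq] at hslice
    rw [PySem.List.slice_toNat lst (a := i) (b := i + 2) (by omega) (by omega)] at hslice
    rw [show (i + 2).toNat - i.toNat = 2 from by omega] at hslice
    intro hnil
    rw [List.filterMap_eq_nil_iff] at hnil
    have hj := hnil i.toNat (by rw [List.mem_range]; omega)
    rw [if_pos ((take_two_drop lst i.toNat id id (by omega)).mp hslice)] at hj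
    exact Option.some_ne_none _ hj
  · intro hne
    have hex : ∃ j ∈ List.range (lst.length - 1),
        lst.getD j 0 = id ∧ lst.getD (j + 1) 0 = id := by
      by_contra hall
      push_neg at hall
      apply hne
      rw [List.filterMap_eq_nil_iff]
      intro j hj
      rw [if_neg]
      rintro ⟨h1, h2⟩
      exact hall j hj h1 h2
    obtain ⟨j, hj, hc⟩ := hex
    rw [List.mem_range] at hj
    refine ⟨(j : Int), ?_, ?_⟩
    · rw [PySem.List.mem_pyRange_one]; omega
    · rw [beq_iff_eq]
      rw [PySem.List.slice_toNat lst (a := (j : Int)) (b := (j : Int) + 2) (by omega) (by omega)]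
      rw [show ((j : Int) + 2).toNat - (j : Int).toNat = 2 from by omega]
      rw [show ((j : Int)).toNat = j from by omega]
      exact (take_two_drop lst j id id (by omega)).mpr hc

-- the shared branch body: A's existence-scan choice equals B's derived choice, on any tail
theorem branch_eq (tl : List Int) (id : Int) :
    (if is_sublist [id, id] tl then find_double_13 tl id else find_13_indices tl id)
      = (if doublesB (occB tl id) = [] then occB tl id else doublesB (occB tl id)) := by
  have hocc : occB tl id = occF id tl 0 := occ_filterMap_eq_occF tl id 0
  have hdbl : doublesB (occB tl id) = dblF id tl 0 := by
    rw [hocc]; exact pairsAdj_occF id tl 0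
  have hfind : find_13_indices tl id = occF id tl 0 := by
    unfold find_13_indices
    rw [find_13_indices_eq_occF, List.nil_append]
  by_cases hs : dblF id tl 0 = []
  · rw [if_neg (by rw [is_sublist_iff_dblF]; simp [hs]), if_pos (by rw [hdbl]; exact hs)]
    rw [hfind, hocc]
  · rw [if_pos ((is_sublist_iff_dblF tl id).mpr hs), if_neg (by rw [hdbl]; exact hs)]
    rw [find_double_13_eq_dblF, hdbl]

-- ===== VERDICT (by name: the statement is the Claim_ definition above) =====
theorem compute_index_spec : Claim_equal_compute_index := by
  intro vl id _ _
  show compute_index vl id = compute_index_alt vl id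
  unfold compute_index compute_index_alt
  by_cases hg : PySem.List.pyGet? vl 0 = some id ∧ PySem.List.pyGet? vl 1 = some id
  · rw [if_pos hg]
    simp only [if_pos hg]
    rw [branch_eq]
  · rw [if_neg hg]
    simp only [if_neg hg]
    rw [branch_eq]
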